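-- pv_equiv track=rewrite | github.com/hughesadam87/pyparty | pyparty/utils.py | _mod_closest
-- ===== SOURCE A (Python) =====
-- import operator
--
-- def _mod_closest(count, testrange=[3,4,5,6]):
--     """ Computes n % count for n in range of values and returns n for
--     which the modulo was closest (ie only needed to increase n by 1 for n%3;
--     however, may need to increase n by 2 to get n%4...  primarily used for
--     selecting plot columns that minimize number of empty cols in multiplots.
--     When difference is the same between several column values, returns lowest.
--     EG if 3 and 6 have same modulo (for example to 12), 3 is returned.
--     """
--     score = []
--     for j in testrange:
--         val = count
--         diff = 0
--         while val % j != 0: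
--             val += 1
--             diff += 1
--         if diff == 0:
--             return j
--         score.append((j,diff))
--     score = sorted(score, key=operator.itemgetter(1))
--     return score[0][0]
-- ===== SOURCE B (Python) =====
-- def _mod_closest(count, testrange=[3,4,5,6]):
--     """Closed-form rewrite: the increment needed for j is (-count) % abs(j),
--     computed directly instead of by a counting loop."""
--     best = None
--     for j in testrange:
--         d = (-count) % abs(j)
--         if best is None or d < best[0]:
--             best = (d, j)
--             if d == 0:
--                 break
--     return best[1]
-- ===== Notes on version B (the rewrite author's own statement) =====
-- stated objective: faster
-- what changed: B replaces A's per-element counting while-loop (increment val until j divides it) by the closed form (-count) % abs(j) and replaces A's collect-then-stable-sort selection by a single running-best scan.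
import Mathlib
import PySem

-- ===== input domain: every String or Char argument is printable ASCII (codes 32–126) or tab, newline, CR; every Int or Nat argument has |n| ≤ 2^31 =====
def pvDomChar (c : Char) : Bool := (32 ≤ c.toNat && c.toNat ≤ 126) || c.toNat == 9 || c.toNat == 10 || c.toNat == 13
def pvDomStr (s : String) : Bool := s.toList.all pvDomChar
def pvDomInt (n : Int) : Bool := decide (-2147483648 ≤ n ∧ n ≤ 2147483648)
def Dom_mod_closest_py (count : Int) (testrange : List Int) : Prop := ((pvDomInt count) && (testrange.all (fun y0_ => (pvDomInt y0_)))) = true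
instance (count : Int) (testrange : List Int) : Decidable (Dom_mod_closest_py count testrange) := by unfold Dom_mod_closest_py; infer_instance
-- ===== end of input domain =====

-- B replaces A's per-element counting while-loop by the closed form (-count) % abs(j)
-- and a single running-best scan instead of collect-then-sort (objective: faster).

-- ===== PORT A =====

-- the 'while val % j != 0: val += 1; diff += 1' loop; returns the final diff.
-- arithmetic helper cited by pvAWhile's termination proof and by pvAWhile_eq below
theorem pv_emod_pred (val n : Int) (hn : 0 < n) (h1 : (-val) % n ≠ 0) :
    (-(val + 1)) % n = (-val) % n - 1 := by
  have hr0 : 0 ≤ (-val) % n := Int.emod_nonneg _ (by omega)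
  have hrlt : (-val) % n < n := Int.emod_lt_of_pos _ hn
  have hdm : n * ((-val) / n) + (-val) % n = -val := Int.mul_ediv_add_emod (-val) n
  have key : -(val + 1) = ((-val) % n - 1) + n * ((-val) / n) := by linarith
  rw [key, Int.add_mul_emod_self_left]
  exact Int.emod_eq_of_lt (by omega) (by omega)

-- the 'j = 0' guard only makes the recursion total where Python raises ZeroDivisionError
-- (excluded by Pre_); termination: the distance to the next multiple of |j| shrinks.
def pvAWhile (j val diff : Int) : Int :=
  if hj : j = 0 then diff
  else if PySem.Int.mod val j = 0 then diff
  else pvAWhile j (val + 1) (diff + 1)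
termination_by ((-val) % ((j.natAbs : Int))).natAbs
decreasing_by
  have hn : (0:Int) < (j.natAbs : Int) := by
    have := Int.natAbs_pos.mpr hj; exact_mod_cast this
  rename_i hm
  rw [PySem.Int.mod_eq_zero_iff_dvd] at hm
  have hdvd : ¬ ((j.natAbs : Int) ∣ val) := fun h => hm ((Int.natAbs_dvd).mp h)
  have h1 : (-val) % (j.natAbs : Int) ≠ 0 := by
    intro h
    exact hdvd (Int.dvd_neg.mp (Int.dvd_of_emod_eq_zero h))
  have h2 := pv_emod_pred val ((j.natAbs : Int)) hn h1
  have hr0 : 0 ≤ (-val) % ((j.natAbs : Int)) := Int.emod_nonneg _ (by omega)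
  omega

-- per-iteration body and final 'sorted(score, key=itemgetter(1))[0][0]'
def pvALoop (count : Int) : List Int → List (Int × Int) → Int
  | [], score =>
      match PySem.List.sorted score (fun p => p.2) with
      | [] => 0          -- score[0] raises IndexError in Python (excluded by Pre_)
      | p :: _ => p.1
  | j :: rest, score =>
      let diff := pvAWhile j count 0
      if diff = 0 then j
      else pvALoop count rest (score ++ [(j, diff)])

def mod_closest_py (count : Int) (testrange : List Int) : Int :=
  pvALoop count testrange []

-- ===== PORT B =====

-- B's loop: best = None / (d, j); update on strict <, break when d == 0.
def pvBLoop (count : Int) : List Int → Option (Int × Int) → Int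
  | [], best =>
      match best with
      | none => 0        -- best[1] on None raises TypeError in Python (excluded by Pre_)
      | some b => b.2
  | j :: rest, best =>
      let d := PySem.Int.mod (-count) ((j.natAbs : Int))
      match best with
      | none => if d = 0 then j else pvBLoop count rest (some (d, j))
      | some (bd, bj) =>
          if d < bd then (if d = 0 then j else pvBLoop count rest (some (d, j)))
          else pvBLoop count rest (some (bd, bj))

def mod_closest_py_alt (count : Int) (testrange : List Int) : Int :=
  pvBLoop count testrange none

-- ===== PRECONDITION & SPEC =====
-- Pre_ excludes exactly the inputs where the Python raises: the empty testrange
-- (IndexError in A / TypeError in B) and any testrange whose first 0 is not preceded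
-- by a divisor of count (ZeroDivisionError in both).
def Pre_mod_closest_py (count : Int) (testrange : List Int) : Prop :=
  testrange ≠ [] ∧
  ∀ i : Fin testrange.length, testrange.get i = 0 →
    ∃ k : Fin testrange.length, k.val < i.val ∧ testrange.get k ∣ count
instance (count : Int) (testrange : List Int) : Decidable (Pre_mod_closest_py count testrange) := by unfold Pre_mod_closest_py; infer_instance

def pvWitness_mod_closest_py : Int × List Int := (7, [3, 4, 5, 6])

def Spec_mod_closest_py (count : Int) (testrange : List Int) (out : Int) : Prop := out = mod_closest_py_alt count testrange
instance (count : Int) (testrange : List Int) (out : Int) : Decidable (Spec_mod_closest_py count testrange out) := by unfold Spec_mod_closest_py; infer_instance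

-- ===== CLAIM (what is proved, stated in full; the proofs are below) =====
def Claim_equal_mod_closest_py : Prop := ∀ (count : Int) (testrange : List Int), Dom_mod_closest_py count testrange → Pre_mod_closest_py count testrange → Spec_mod_closest_py count testrange (mod_closest_py count testrange)

-- ===== LEMMAS AND PROOFS =====

-- running first-minimum (B's best), as a pure fold
def pvStep (b : Option (Int × Int)) (p : Int × Int) : Option (Int × Int) :=
  match b with
  | none => some (p.2, p.1)
  | some (bd, bj) => if p.2 < bd then some (p.2, p.1) else some (bd, bj)

def pvFM (l : List (Int × Int)) : Option (Int × Int) := l.foldl pvStep none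

theorem pvAWhile_eq (j : Int) (hj : j ≠ 0) (val diff : Int) :
    pvAWhile j val diff = diff + (-val) % ((j.natAbs : Int)) := by
  have hn : (0:Int) < (j.natAbs : Int) := by
    have := Int.natAbs_pos.mpr hj; exact_mod_cast this
  fun_induction pvAWhile j val diff with
  | case1 val diff h => exact absurd h hj
  | case2 val diff h hm =>
      rw [PySem.Int.mod_eq_zero_iff_dvd] at hm
      have : ((j.natAbs : Int)) ∣ (-val) := Int.dvd_neg.mpr ((Int.natAbs_dvd).mpr hm)
      rw [Int.emod_eq_zero_of_dvd this]; ring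
  | case3 val diff h hm ih =>
      rw [PySem.Int.mod_eq_zero_iff_dvd] at hm
      have hdvd : ¬ ((j.natAbs : Int) ∣ val) := fun hh => hm ((Int.natAbs_dvd).mp hh)
      have h1 : (-val) % (j.natAbs : Int) ≠ 0 := by
        intro hh
        exact hdvd (Int.dvd_neg.mp (Int.dvd_of_emod_eq_zero hh))
      rw [ih, pv_emod_pred val _ hn h1]; ring

theorem pv_sorted_head (score : List (Int × Int)) :
    (PySem.List.sorted score (fun p => p.2)).head? = (pvFM score).map (fun b => (b.2, b.1)) := by
  induction score using List.reverseRecOn with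
  | nil => simp [pvFM, PySem.List.sorted]
  | append_singleton l p ih =>
      have hs : PySem.List.sorted (l ++ [p]) (fun q : Int × Int => q.2) =
          PySem.List.insertBy (fun a b => decide (a.2 < b.2)) p
            (PySem.List.sorted l (fun q => q.2)) := by
        rw [PySem.List.sorted_eq_foldl_insertBy, PySem.List.sorted_eq_foldl_insertBy,
          List.foldl_append, List.foldl_cons, List.foldl_nil]
      have hfm : pvFM (l ++ [p]) = pvStep (pvFM l) p := by
        simp [pvFM, List.foldl_append]
      rw [hs, hfm]
      cases hsl : PySem.List.sorted l (fun q : Int × Int => q.2) with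
      | nil =>
          rw [hsl] at ih
          have : pvFM l = none := by
            cases h : pvFM l with
            | none => rfl
            | some b => rw [h] at ih; simp at ih
          simp [this, PySem.List.insertBy, pvStep]
      | cons h t =>
          rw [hsl] at ih
          have hfl : pvFM l = some (h.2, h.1) := by
            cases hb : pvFM l with
            | none => rw [hb] at ih; simp at ih
            | some b =>
                rw [hb] at ih
                simp at ih
                rw [ih]
          rw [hfl]
          by_cases hlt : p.2 < h.2
          · simp [PySem.List.insertBy, pvStep, hlt]
          · simp [PySem.List.insertBy, pvStep, hlt]

-- induction-friendly form of the precondition on the remaining list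
def pvPreL (count : Int) : List Int → Prop
  | [] => True
  | j :: rest => j ≠ 0 ∧ (j ∣ count ∨ pvPreL count rest)

theorem pvPre_to_preL (count : Int) : ∀ (l : List Int),
    (∀ i : Fin l.length, l.get i = 0 → ∃ k : Fin l.length, k.val < i.val ∧ l.get k ∣ count) →
    pvPreL count l := by
  intro l
  induction l with
  | nil => intro _; trivial
  | cons j rest ih =>
      intro H
      constructor
      · intro hj0
        obtain ⟨k, hk, -⟩ := H ⟨0, by simp⟩ hj0
        simp at hk
      · by_cases hd : j ∣ count
        · exact Or.inl hd
        · refine Or.inr (ih ?_)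
          intro i hi
          obtain ⟨k, hk, hkd⟩ := H ⟨i.val + 1, by simpa using i.isLt⟩ (by simpa using hi)
          have hk2 : k.val < i.val + 1 := by simpa using hk
          match k, hk2, hkd with
          | ⟨0, _⟩, _, hkd => exact absurd (by simp at hkd; exact hkd) hd
          | ⟨k' + 1, hk'⟩, hk2, hkd =>
              exact ⟨⟨k', by simpa using hk'⟩, by simp at hk2 ⊢; omega, by simpa using hkd⟩

theorem pvFM_pos : ∀ (l : List (Int × Int)), (∀ p ∈ l, 0 < p.2) →
    ∀ bd bj, pvFM l = some (bd, bj) → 0 < bd := by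
  have gen : ∀ (l : List (Int × Int)) (b : Int × Int), (∀ p ∈ l, 0 < p.2) → 0 < b.1 →
      ∀ bd bj, l.foldl pvStep (some b) = some (bd, bj) → 0 < bd := by
    intro l
    induction l with
    | nil =>
        intro b _ hb bd bj h
        simp only [List.foldl_nil, Option.some.injEq] at h
        subst h; simpa using hb
    | cons p t iht =>
        intro b hpos hb bd bj h
        simp only [List.foldl_cons] at h
        have hp : 0 < p.2 := hpos p (by simp)
        cases hbv : pvStep (some b) p with
        | none => simp only [pvStep] at hbv; split at hbv <;> simp_all
        | some b' =>
            rw [hbv] at h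
            have hb' : 0 < b'.1 := by
              obtain ⟨b1, b2⟩ := b
              simp only [pvStep] at hbv
              split at hbv <;> (cases hbv; simp_all)
            exact iht b' (fun q hq => hpos q (by simp [hq])) hb' bd bj h
  intro l hpos bd bj h
  cases l with
  | nil => simp [pvFM] at h
  | cons p t =>
      have hp : 0 < p.2 := hpos p (by simp)
      simp only [pvFM, List.foldl_cons, pvStep] at h
      exact gen t (p.2, p.1) (fun q hq => hpos q (by simp [hq])) (by simpa) bd bj h

theorem pv_loop_eq (count : Int) : ∀ (rest : List Int) (score : List (Int × Int)),
    (∀ p ∈ score, 0 < p.2) → pvPreL count rest →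
    pvALoop count rest score = pvBLoop count rest (pvFM score) := by
  intro rest
  induction rest with
  | nil =>
      intro score hpos _
      have hh := pv_sorted_head score
      simp only [pvALoop, pvBLoop]
      cases hfm : pvFM score with
      | none => rw [hfm] at hh; simp at hh; rw [hh]
      | some b =>
          rw [hfm] at hh; simp at hh
          cases hsl : PySem.List.sorted score (fun q : Int × Int => q.2) with
          | nil => rw [hsl] at hh; simp at hh
          | cons h t => rw [hsl] at hh; simp at hh; rw [hh]
  | cons j rest ih =>
      intro score hpos hpre
      obtain ⟨hj0, hdisj⟩ := hpre
      have hwe := pvAWhile_eq j hj0 count 0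
      have hn : (0:Int) < (j.natAbs : Int) := by
        have := Int.natAbs_pos.mpr hj0; exact_mod_cast this
      have hdvd_iff : (-count) % ((j.natAbs : Int)) = 0 ↔ j ∣ count := by
        constructor
        · intro h
          exact (Int.natAbs_dvd).mp (Int.dvd_neg.mp (Int.dvd_of_emod_eq_zero h))
        · intro h
          exact Int.emod_eq_zero_of_dvd (Int.dvd_neg.mpr ((Int.natAbs_dvd).mpr h))
      simp only [pvALoop, pvBLoop, hwe, zero_add]
      set d := (-count) % ((j.natAbs : Int)) with hd
      have hmodd : PySem.Int.mod (-count) ((j.natAbs : Int)) = d := by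
        rw [PySem.Int.mod_eq_emod_of_pos hn]
      have hmodd2 : PySem.Int.mod (-count) |j| = d := by
        rw [show |j| = ((j.natAbs : Int)) from Int.abs_eq_natAbs j]
        exact hmodd
      have hd0 : 0 ≤ d := Int.emod_nonneg _ (by omega)
      by_cases hz : d = 0
      · cases hfm : pvFM score with
        | none => simp [hz, hmodd2]
        | some b =>
            obtain ⟨bd, bj⟩ := b
            have hbd : 0 < bd := pvFM_pos score hpos bd bj hfm
            simp [hz, hmodd2, show (0:Int) < bd from hbd]
      · have hrest : pvPreL count rest := by
          rcases hdisj with h | h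
          · exact absurd (hdvd_iff.mpr h) hz
          · exact h
        have hpos' : ∀ p ∈ score ++ [(j, d)], 0 < p.2 := by
          intro p hp
          rcases List.mem_append.mp hp with h | h
          · exact hpos p h
          · simp at h; subst h; omega
        rw [if_neg hz]
        have := ih (score ++ [(j, d)]) hpos' hrest
        rw [this]
        have hfm : pvFM (score ++ [(j, d)]) = pvStep (pvFM score) (j, d) := by
          simp [pvFM, List.foldl_append]
        rw [hfm]
        cases hfms : pvFM score with
        | none => simp [pvStep, hmodd2, hz]
        | some b =>
            obtain ⟨bd, bj⟩ := b
            by_cases hlt : d < bd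
            · simp [pvStep, hmodd2, hlt, hz]
            · simp [pvStep, hmodd2, hlt]

-- ===== VERDICT (by name: the statement is the Claim_ definition above) =====
theorem mod_closest_py_spec : Claim_equal_mod_closest_py := by
  intro count testrange _ hpre
  unfold Spec_mod_closest_py mod_closest_py mod_closest_py_alt
  have := pv_loop_eq count testrange [] (by simp) (pvPre_to_preL count testrange hpre.2)
  simpa [pvFM] using this
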